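-- pv_equiv track=rewrite | github.com/tewodros18/Competitive-Programming | contest/secondcodeforce/31vs32.py | bfs
-- ===== SOURCE A (Python) =====
-- from collections import deque
--
-- def bfs(start,target):
--     result = []
--     queue = deque([start])
--     level_count = 0
--     while queue:
--         level_size = len(queue)
--         for i in range(level_size):
--             current_node = queue.popleft()
--             if(current_node == target):
--                 return (level_count)
--             if current_node + 4 <= target + 4:
--                 queue.append(current_node + 4 )
--                 level_count += 1
--             if current_node - 1 >= target:
--                 queue.append(current_node - 1)
--                 level_count += 1
-- ===== SOURCE B (Python) =====
-- def bfs(start, target):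
--     # closed form: m upward (+4) moves, then (start + 4*m - target) downward (-1) moves
--     m = max(0, (target - start + 3) // 4)
--     return m + (start + 4 * m - target)
-- ===== Notes on version B (the rewrite author's own statement) =====
-- stated objective: faster
-- what changed: Replaced the level-by-level deque simulation (which walks +4 steps up past the target and then -1 steps down, counting every push) with a closed-form O(1) formula: m = max(0, ceil((target-start)/4)) upward moves plus (start+4m-target) downward moves.
import Mathlib
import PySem

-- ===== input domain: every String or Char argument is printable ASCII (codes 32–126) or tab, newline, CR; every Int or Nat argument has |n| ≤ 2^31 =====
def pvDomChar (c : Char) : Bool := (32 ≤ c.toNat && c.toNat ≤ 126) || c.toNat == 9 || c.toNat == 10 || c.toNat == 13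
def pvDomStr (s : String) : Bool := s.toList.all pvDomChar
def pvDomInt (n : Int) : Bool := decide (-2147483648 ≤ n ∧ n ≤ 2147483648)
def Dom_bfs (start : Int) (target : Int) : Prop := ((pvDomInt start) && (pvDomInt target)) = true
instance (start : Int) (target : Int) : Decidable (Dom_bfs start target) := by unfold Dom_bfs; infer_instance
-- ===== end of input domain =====

-- B replaces A's level-by-level deque simulation with a closed-form O(1) count of the +4 and -1 moves.

-- ===== PORT A =====
-- one pass of the inner 'for i in range(level_size)' loop: returns (early return value if any, queue, level_count)
def bfsInner (target : Int) : Nat → List Int → Int → Option Int × List Int × Int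
  | 0, q, lc => (none, q, lc)
  | n + 1, q, lc =>
    match q with
    | [] => (none, [], lc)   -- popleft from an empty deque would raise in Python; unreachable (level_size items are present)
    | c :: rest =>
      if c = target then (some lc, rest, lc)
      else
        let p1 := if c + 4 ≤ target + 4 then (rest ++ [c + 4], lc + 1) else (rest, lc)
        let p2 := if c - 1 ≥ target then (p1.1 ++ [c - 1], p1.2 + 1) else p1
        bfsInner target n p2.1 p2.2

-- the 'while queue' loop; fuel only makes the same computation total (proved sufficient below)
def bfsLoop (target : Int) : Nat → List Int → Int → Int
  | 0, _, _ => 0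
  | fuel + 1, queue, lc =>
    if queue.isEmpty then 0   -- Python's fall-off-the-end (None); unreachable: the queue never empties
    else
      match bfsInner target queue.length queue lc with
      | (some r, _, _) => r
      | (none, q', lc') => bfsLoop target fuel q' lc'

def bfs (start : Int) (target : Int) : Int :=
  bfsLoop target ((start - target).natAbs + 8) [start] 0

-- ===== PORT B =====
def bfs_alt (start : Int) (target : Int) : Int :=
  let m := max 0 (PySem.Int.floordiv (target - start + 3) 4)
  m + (start + 4 * m - target)

-- ===== PRECONDITION & SPEC =====
def Spec_bfs (start : Int) (target : Int) (out : Int) : Prop := out = bfs_alt start target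
instance (start : Int) (target : Int) (out : Int) : Decidable (Spec_bfs start target out) := by unfold Spec_bfs; infer_instance

-- ===== CLAIM (what is proved, stated in full; the proofs are below) =====
def Claim_equal_bfs : Prop := ∀ (start : Int) (target : Int), Dom_bfs start target → Spec_bfs start target (bfs start target)

-- ===== LEMMAS AND PROOFS =====
theorem fd_bounds (a : Int) :
    (PySem.Int.floordiv a 4) * 4 ≤ a ∧ a < (PySem.Int.floordiv a 4 + 1) * 4 :=
  (PySem.Int.floordiv_eq_iff_of_pos (by norm_num)).mp rfl

theorem alt_self (t : Int) : bfs_alt t t = 0 := by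
  have h := fd_bounds (t - t + 3)
  simp only [bfs_alt]
  omega

theorem alt_nonneg (c t : Int) : 0 ≤ bfs_alt c t := by
  have h := fd_bounds (t - c + 3)
  simp only [bfs_alt]
  omega

theorem alt_bound (c t : Int) : bfs_alt c t ≤ (c - t).natAbs + 7 := by
  have h := fd_bounds (t - c + 3)
  simp only [bfs_alt]
  omega

theorem alt_down (c t : Int) (h : t < c) : bfs_alt c t = bfs_alt (c - 1) t + 1 := by
  have h1 := fd_bounds (t - c + 3)
  have h2 := fd_bounds (t - (c - 1) + 3)
  simp only [bfs_alt]
  omega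

theorem alt_up (c t : Int) (h : c < t) : bfs_alt c t = bfs_alt (c + 4) t + 1 := by
  have h1 := fd_bounds (t - c + 3)
  have h2 := fd_bounds (t - (c + 4) + 3)
  simp only [bfs_alt]
  omega

theorem loop_eq (t : Int) : ∀ (fuel : Nat) (c lc : Int),
    (bfs_alt c t).toNat < fuel → bfsLoop t fuel [c] lc = lc + bfs_alt c t := by
  intro fuel
  induction fuel with
  | zero => intro c lc h; omega
  | succ f ih =>
    intro c lc h
    by_cases hc : c = t
    · subst hc
      simp [bfsLoop, bfsInner, alt_self]
    · rcases lt_or_gt_of_ne hc with hlt | hgt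
      · -- c < t : push c + 4
        have hstep := alt_up c t hlt
        have hnn := alt_nonneg (c + 4) t
        have : bfsLoop t (f + 1) [c] lc = bfsLoop t f [c + 4] (lc + 1) := by
          simp only [bfsLoop, bfsInner, List.isEmpty_cons, List.length_cons, List.length_nil]
          rw [if_neg hc, if_pos (by omega : c + 4 ≤ t + 4), if_neg (by omega : ¬ c - 1 ≥ t)]
          simp
        rw [this, ih (c + 4) (lc + 1) (by omega)]
        omega
      · -- c > t : push c - 1
        have hstep := alt_down c t hgt
        have hnn := alt_nonneg (c - 1) t
        have : bfsLoop t (f + 1) [c] lc = bfsLoop t f [c - 1] (lc + 1) := by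
          simp only [bfsLoop, bfsInner, List.isEmpty_cons, List.length_cons, List.length_nil]
          rw [if_neg hc, if_neg (by omega : ¬ c + 4 ≤ t + 4), if_pos (by omega : c - 1 ≥ t)]
          simp
        rw [this, ih (c - 1) (lc + 1) (by omega)]
        omega

-- ===== VERDICT (by name: the statement is the Claim_ definition above) =====
theorem bfs_spec : Claim_equal_bfs := by
  intro start target _
  have hb := alt_bound start target
  have hn := alt_nonneg start target
  have := loop_eq target ((start - target).natAbs + 8) start 0 (by omega)
  simpa [Spec_bfs, bfs] using this
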